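-- pv_equiv track=rewrite | github.com/acherm/chessprogramming-SPL | scripts/analyze_feature_span.py | brace_depths
-- ===== SOURCE A (Python) =====
-- def brace_depths(text: str) -> list[int]:
--     depths = [0] * (len(text) + 1)
--     depth = 0
--     for idx, ch in enumerate(text):
--         depths[idx] = depth
--         if ch == "{":
--             depth += 1
--         elif ch == "}":
--             depth = max(depth - 1, 0)
--     depths[len(text)] = depth
--     return depths
-- ===== SOURCE B (Python) =====
-- def brace_depths(text: str) -> list[int]:
--     # prefix sums of +1/-1 steps, then clamp via running minimum: depth[i] = P[i] - min(P[0..i])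
--     P = [0]
--     for ch in text:
--         P.append(P[-1] + (1 if ch == "{" else -1 if ch == "}" else 0))
--     res = []
--     m = 0
--     for p in P:
--         if p < m:
--             m = p
--         res.append(p - m)
--     return res
-- ===== Notes on version B (the rewrite author's own statement) =====
-- stated objective: alternative
-- what changed: Replaces the clamped-accumulator scan by a prefix-sum array plus a running-minimum pass (depth[i] = P[i] - min(P[0..i]))
import Mathlib
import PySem

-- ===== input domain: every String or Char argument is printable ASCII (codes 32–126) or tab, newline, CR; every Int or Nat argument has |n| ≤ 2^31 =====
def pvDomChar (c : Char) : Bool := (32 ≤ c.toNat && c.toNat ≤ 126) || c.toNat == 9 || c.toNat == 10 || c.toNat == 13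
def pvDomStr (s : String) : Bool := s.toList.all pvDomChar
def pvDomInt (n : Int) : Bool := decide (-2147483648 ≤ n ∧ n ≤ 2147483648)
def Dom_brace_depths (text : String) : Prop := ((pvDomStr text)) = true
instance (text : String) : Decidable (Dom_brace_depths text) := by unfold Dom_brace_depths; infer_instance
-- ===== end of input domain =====

-- B computes the same depths via prefix sums plus a running minimum instead of a clamped accumulator (alternative decomposition, same cost).


-- ===== PORT A =====
-- A's loop: emit the current depth at each position, update it ('{' +1, '}' clamped -1), emit the final depth.
def braceLoopA : List Char → Int → List Int
  | [], d => [d]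
  | c :: cs, d =>
      d :: braceLoopA cs (if c = '{' then d + 1 else if c = '}' then max (d - 1) 0 else d)

def brace_depths (text : String) : List Int := braceLoopA text.toList 0

-- ===== PORT B =====
def stepOf (c : Char) : Int := if c = '{' then 1 else if c = '}' then -1 else 0

-- prefix-sum list P (length n+1), starting from accumulator p
def prefixP : List Int → Int → List Int
  | [], p => [p]
  | s :: ss, p => p :: prefixP ss (p + s)

-- running-minimum pass: emit p - min-so-far
def scanMin : List Int → Int → List Int
  | [], _ => []
  | p :: ps, m =>
      let m' := if p < m then p else m
      (p - m') :: scanMin ps m'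

def brace_depths_alt (text : String) : List Int :=
  scanMin (prefixP (text.toList.map stepOf) 0) 0

-- ===== PRECONDITION & SPEC =====
def Spec_brace_depths (text : String) (out : List Int) : Prop := out = brace_depths_alt text
instance (text : String) (out : List Int) : Decidable (Spec_brace_depths text out) := by unfold Spec_brace_depths; infer_instance

-- ===== CLAIM (what is proved, stated in full; the proofs are below) =====
def Claim_equal_brace_depths : Prop := ∀ (text : String), Dom_brace_depths text → Spec_brace_depths text (brace_depths text)

-- ===== LEMMAS AND PROOFS =====
-- Reflection identity: the running-minimum scan of the prefix sums equals A's clamped scan,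
-- with A's depth being p - min p m at each step.
theorem scanMin_prefixP (cs : List Char) :
    ∀ p m : Int, scanMin (prefixP (cs.map stepOf) p) m = braceLoopA cs (p - min p m) := by
  induction cs with
  | nil =>
      intro p m
      simp only [List.map, prefixP, scanMin, braceLoopA]
      congr 1
      by_cases h : p < m <;> simp [h] <;> omega
  | cons c cs ih =>
      intro p m
      simp only [List.map, prefixP, scanMin, braceLoopA]
      have hm' : (if p < m then p else m) = min p m := by
        by_cases h : p < m <;> simp [h] <;> omega
      rw [hm', ih]
      congr 1
      unfold stepOf
      split_ifs <;> (congr 1; omega)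

-- ===== VERDICT (by name: the statement is the Claim_ definition above) =====
theorem brace_depths_spec : Claim_equal_brace_depths := by
  intro text _
  unfold Spec_brace_depths brace_depths brace_depths_alt
  rw [scanMin_prefixP]
  norm_num
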